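-- pv_equiv track=rewrite | github.com/pelmenx/courses | Daily Coding Problem/Solutions/Daily Coding Problem: Problem #56 [Medium].py | sort_nodes
-- ===== SOURCE A (Python) =====
-- import copy
--
-- def sort_nodes(adjacency_matrix):
--     tmp_matrix = copy.deepcopy(adjacency_matrix)
--     sorted_nodes = []
--     colored_dict = {}
--     rang = 0
--     while rang <= len(adjacency_matrix):
--         for i, row in reversed(list(enumerate(tmp_matrix))):
--             if sum(row) == rang:
--                 sorted_nodes.append(i)
--                 colored_dict[i] = None
--         rang += 1
--     return sorted_nodes, colored_dict
-- ===== SOURCE B (Python) =====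
-- def sort_nodes(adjacency_matrix):
--     n = len(adjacency_matrix)
--     sums = [sum(row) for row in adjacency_matrix]
--     buckets = [[] for _ in range(n + 1)]
--     for i in reversed(range(n)):
--         s = sums[i]
--         if 0 <= s <= n:
--             buckets[s].append(i)
--     nodes = [i for bucket in buckets for i in bucket]
--     return nodes, {i: None for i in nodes}
-- ===== Notes on version B (the rewrite author's own statement) =====
-- stated objective: faster
-- what changed: B computes each row sum once and distributes indices into per-sum buckets in a single reversed pass, then concatenates buckets in ascending sum order, instead of A's rescanning the whole matrix (recomputing every row sum) once per candidate rank value.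
import Mathlib
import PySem

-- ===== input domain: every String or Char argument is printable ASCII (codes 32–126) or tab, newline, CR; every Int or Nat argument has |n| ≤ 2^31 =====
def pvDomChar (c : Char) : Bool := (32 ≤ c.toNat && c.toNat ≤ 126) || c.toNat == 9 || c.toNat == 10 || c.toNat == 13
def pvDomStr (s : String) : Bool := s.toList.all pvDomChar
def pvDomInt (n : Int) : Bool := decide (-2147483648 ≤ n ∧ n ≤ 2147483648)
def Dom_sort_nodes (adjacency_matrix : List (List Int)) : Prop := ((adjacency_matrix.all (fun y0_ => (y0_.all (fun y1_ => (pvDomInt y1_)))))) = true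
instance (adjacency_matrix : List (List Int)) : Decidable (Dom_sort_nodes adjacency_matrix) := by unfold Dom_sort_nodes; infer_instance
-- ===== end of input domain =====

-- B replaces A's rescan of the whole matrix (recomputing every row sum) for each rank value 0..n by
-- one precomputed row-sum list and one reversed bucketing pass (objective: faster, O(n^3) → O(n^2)).

-- ===== PORT A =====
def sort_nodes (adjacency_matrix : List (List Int)) : List Int × (List (Int × Option Int)) :=
  -- tmp_matrix = copy.deepcopy(adjacency_matrix): a value copy of a list of lists of ints
  let tmp_matrix := adjacency_matrix
  -- `rang = 0; while rang <= len(adjacency_matrix): … rang += 1` iterates rang over range(0, len+1)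
  let st := (PySem.List.pyRange 0 ((adjacency_matrix.length : Int) + 1) 1).foldl
    (fun (st : List Int × PySem.Dict Int (Option Int)) rang =>
      (PySem.List.enumerate tmp_matrix).reverse.foldl
        (fun st2 p =>
          if p.2.sum == rang then (st2.1 ++ [p.1], st2.2.insert p.1 none) else st2) st)
    ([], PySem.Dict.empty)
  (st.1, st.2.items)

-- ===== PORT B =====
def sort_nodes_alt (adjacency_matrix : List (List Int)) : List Int × (List (Int × Option Int)) :=
  let n := adjacency_matrix.length
  let sums := adjacency_matrix.map List.sum
  let buckets0 : List (List Int) := List.replicate (n + 1) []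
  -- `for i in reversed(range(n))`: i is always a valid index into sums, so sums[i] is getD
  let buckets := (List.range n).reverse.foldl
    (fun b i =>
      let s := sums.getD i 0
      if 0 ≤ s ∧ s ≤ (n : Int) then b.modify s.toNat (· ++ [(i : Int)]) else b)
    buckets0
  let nodes := buckets.flatten
  (nodes, (nodes.foldl (fun (d : PySem.Dict Int (Option Int)) i => d.insert i none) PySem.Dict.empty).items)

-- ===== PRECONDITION & SPEC =====
def Spec_sort_nodes (adjacency_matrix : List (List Int)) (out : List Int × (List (Int × Option Int))) : Prop := out = sort_nodes_alt adjacency_matrix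
instance (adjacency_matrix : List (List Int)) (out : List Int × (List (Int × Option Int))) : Decidable (Spec_sort_nodes adjacency_matrix out) := by unfold Spec_sort_nodes; infer_instance

-- ===== CLAIM (what is proved, stated in full; the proofs are below) =====
def Claim_equal_sort_nodes : Prop := ∀ (adjacency_matrix : List (List Int)), Dom_sort_nodes adjacency_matrix → Spec_sort_nodes adjacency_matrix (sort_nodes adjacency_matrix)

-- ===== LEMMAS AND PROOFS =====

-- A's inner `for i, row in reversed(...)` pass for a fixed rang: appends the matching indices and inserts them
theorem innerA (l : List (Int × List Int)) (r : Int) (ns : List Int) (d : PySem.Dict Int (Option Int)) :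
    l.foldl (fun st2 p => if p.2.sum == r then (st2.1 ++ [p.1], st2.2.insert p.1 none) else st2) (ns, d)
    = (ns ++ ((l.filter (fun p => p.2.sum == r)).map (·.1)),
       ((l.filter (fun p => p.2.sum == r)).map (·.1)).foldl (fun d i => d.insert i none) d) := by
  induction l generalizing ns d with
  | nil => simp
  | cons p l ih =>
    simp only [List.foldl_cons]
    by_cases h : (p.2.sum == r) = true
    · rw [if_pos h, ih]
      simp [h, List.append_assoc]
    · rw [if_neg h, ih]
      simp [h]

-- A's outer loop over the rang values: a fold of "append block / insert block" is a flatMap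
theorem outerA (rs : List Int) (g : Int → List Int) (ns : List Int) (d : PySem.Dict Int (Option Int)) :
    rs.foldl (fun st r => (st.1 ++ g r, (g r).foldl (fun d i => d.insert i none) st.2)) (ns, d)
    = (ns ++ rs.flatMap g, (rs.flatMap g).foldl (fun d i => d.insert i none) d) := by
  induction rs generalizing ns d with
  | nil => simp
  | cons r rs ih => simp [ih, List.foldl_append]

-- enumerate as an explicit indexed map
theorem enum_eq (m : List (List Int)) (s : Int) :
    PySem.List.enumerate m s = (List.range m.length).map (fun (k : Nat) => (s + (k : Int), m.getD k [])) := by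
  induction m generalizing s with
  | nil => simp [PySem.List.enumerate_nil]
  | cons x xs ih =>
    rw [PySem.List.enumerate_cons, ih, List.length_cons, List.range_succ_eq_map]
    simp only [List.map_cons, List.map_map, Function.comp_def]
    refine congrArg₂ List.cons (by simp) ?_
    apply List.map_congr_left
    intro k _
    refine Prod.ext ?_ ?_
    · push_cast; ring
    · simp

-- flatten as a flatMap over the positions
theorem flatten_eq_flatMap_range (l : List (List Int)) :
    l.flatten = (List.range l.length).flatMap (fun r => l.getD r []) := by
  induction l with
  | nil => simp
  | cons x xs ih =>
    rw [List.flatten_cons, ih, List.length_cons, List.range_succ_eq_map]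
    simp [List.flatMap_cons, List.flatMap_map]

theorem getD_modify_self (l : List (List Int)) (j : Nat) (f : List Int → List Int) (h : j < l.length) :
    (l.modify j f).getD j [] = f (l.getD j []) := by
  simp [List.getD, List.getElem?_eq_getElem h]

theorem getD_modify_ne (l : List (List Int)) (i j : Nat) (f : List Int → List Int) (h : i ≠ j) :
    (l.modify i f).getD j [] = l.getD j [] := by
  simp [List.getD, h]

theorem length_foldl_buckets (is : List Nat) (q : Nat → Int) (c : Int) (b : List (List Int)) :
    (is.foldl (fun b i => if 0 ≤ q i ∧ q i ≤ c then b.modify (q i).toNat (· ++ [(i : Int)]) else b) b).length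
    = b.length := by
  induction is generalizing b with
  | nil => rfl
  | cons i is ih =>
    simp only [List.foldl_cons]
    split_ifs with h
    · rw [ih]; simp
    · exact ih b

-- B's bucketing loop: bucket r collects, in traversal order, the indices whose sum equals r
theorem bucketInv (is : List Nat) (q : Nat → Int) (c : Int) (r : Nat) (hr : (r : Int) ≤ c) :
    ∀ (b : List (List Int)), (∀ s : Int, 0 ≤ s → s ≤ c → s.toNat < b.length) →
    (is.foldl (fun b i => if 0 ≤ q i ∧ q i ≤ c then b.modify (q i).toNat (· ++ [(i : Int)]) else b) b).getD r []
    = b.getD r [] ++ (is.filter (fun i => q i == (r : Int))).map (fun (i : Nat) => (i : Int)) := by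
  induction is with
  | nil => intro b _; simp
  | cons i is ih =>
    intro b hb
    simp only [List.foldl_cons]
    split_ifs with h
    · have hlen : ∀ s : Int, 0 ≤ s → s ≤ c → s.toNat < (b.modify (q i).toNat (· ++ [(i:Int)])).length := by
        intro s h0 h1; simpa using hb s h0 h1
      rw [ih _ hlen]
      by_cases he : q i = (r : Int)
      · have ht : (q i).toNat = r := by omega
        have hrlt : r < b.length := by
          have := hb (r : Int) (by omega) hr; omega
        rw [ht, getD_modify_self _ _ _ hrlt]
        simp [he, List.append_assoc]
      · have ht : (q i).toNat ≠ r := by omega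
        rw [getD_modify_ne _ _ _ _ ht]
        have : (q i == (r : Int)) = false := by simp [he]
        simp [this]
    · have he : q i ≠ (r : Int) := by
        intro hqr; exact h ⟨by omega, by omega⟩
      have : (q i == (r : Int)) = false := by simp [he]
      rw [ih _ hb]
      simp [this]

theorem getD_map_sum (m : List (List Int)) (i : Nat) :
    (m.map List.sum).getD i 0 = (m.getD i []).sum := by
  simp [List.getD, List.getElem?_map]
  cases m[i]? <;> simp

theorem flatMap_congr_mem {α β : Type} (l : List α) (f g : α → List β)
    (h : ∀ x ∈ l, f x = g x) : l.flatMap f = l.flatMap g := by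
  induction l with
  | nil => rfl
  | cons x xs ih =>
    simp only [List.flatMap_cons, h x (by simp)]
    rw [ih (fun y hy => h y (by simp [hy]))]

theorem sort_nodes_eq (m : List (List Int)) : sort_nodes m = sort_nodes_alt m := by
  simp only [sort_nodes, sort_nodes_alt]
  -- normalise A's nested folds
  have hstep :
      (fun (st : List Int × PySem.Dict Int (Option Int)) rang =>
        (PySem.List.enumerate m).reverse.foldl
          (fun st2 p => if p.2.sum == rang then (st2.1 ++ [p.1], st2.2.insert p.1 none) else st2) st)
      = (fun (st : List Int × PySem.Dict Int (Option Int)) rang =>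
          (st.1 ++ (((PySem.List.enumerate m).reverse.filter (fun p => p.2.sum == rang)).map (·.1)),
           ((((PySem.List.enumerate m).reverse.filter (fun p => p.2.sum == rang)).map (·.1)).foldl
             (fun d i => d.insert i none) st.2))) := by
    funext st rang
    cases st with
    | mk a b => exact innerA _ _ _ _
  rw [hstep, outerA]
  -- A's node list, in flatMap form over Int rang values
  have henum : (PySem.List.enumerate m).reverse
      = ((List.range m.length).reverse.map (fun (k : Nat) => ((k : Int), m.getD k []))) := by
    rw [show PySem.List.enumerate m = PySem.List.enumerate m 0 from rfl, enum_eq]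
    simp [List.map_reverse]
  have hg : ∀ r : Int,
      (((PySem.List.enumerate m).reverse.filter (fun p => p.2.sum == r)).map (·.1))
      = ((List.range m.length).reverse.filter (fun k => (m.getD k []).sum == r)).map (fun (k : Nat) => (k : Int)) := by
    intro r
    rw [henum, List.filter_map, List.map_map]
    simp [Function.comp_def]
  -- B's node list via the bucket invariant
  have hblen : ((List.range m.length).reverse.foldl
      (fun b i =>
        if 0 ≤ (m.map List.sum).getD i 0 ∧ (m.map List.sum).getD i 0 ≤ (m.length : Int)
        then b.modify ((m.map List.sum).getD i 0).toNat (· ++ [(i : Int)]) else b)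
      (List.replicate (m.length + 1) ([] : List Int))).length = m.length + 1 := by
    rw [length_foldl_buckets]; simp
  have hbucket : ∀ r : Nat, (r : Int) ≤ (m.length : Int) →
      ((List.range m.length).reverse.foldl
        (fun b i =>
          if 0 ≤ (m.map List.sum).getD i 0 ∧ (m.map List.sum).getD i 0 ≤ (m.length : Int)
          then b.modify ((m.map List.sum).getD i 0).toNat (· ++ [(i : Int)]) else b)
        (List.replicate (m.length + 1) ([] : List Int))).getD r []
      = ((List.range m.length).reverse.filter (fun i => (m.getD i []).sum == (r : Int))).map (fun (i : Nat) => (i : Int)) := by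
    intro r hr
    rw [bucketInv _ _ _ _ hr _ (by intro s h0 h1; simp; omega)]
    have : ∀ i : Nat, ((m.map List.sum).getD i 0 == (r : Int)) = ((m.getD i []).sum == (r : Int)) := by
      intro i; rw [getD_map_sum]
    simp only [this]
    have hrep : (List.replicate (m.length + 1) ([] : List Int)).getD r [] = [] := by
      simp [List.getD]
    rw [hrep, List.nil_append]
  -- identify the two node lists
  have hnodes :
      (PySem.List.pyRange 0 ((m.length : Int) + 1) 1).flatMap
        (fun r => (((PySem.List.enumerate m).reverse.filter (fun p => p.2.sum == r)).map (·.1)))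
      = ((List.range m.length).reverse.foldl
          (fun b i =>
            if 0 ≤ (m.map List.sum).getD i 0 ∧ (m.map List.sum).getD i 0 ≤ (m.length : Int)
            then b.modify ((m.map List.sum).getD i 0).toNat (· ++ [(i : Int)]) else b)
          (List.replicate (m.length + 1) ([] : List Int))).flatten := by
    rw [flatten_eq_flatMap_range, hblen]
    have hrange : PySem.List.pyRange 0 ((m.length : Int) + 1) 1
        = (List.range (m.length + 1)).map (fun (k : Nat) => (k : Int)) := by
      have := PySem.List.pyRange_zero_nat (m.length + 1)
      push_cast at this ⊢
      exact this
    rw [hrange, List.flatMap_map]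
    apply flatMap_congr_mem
    intro r hrm
    have hr : (r : Int) ≤ (m.length : Int) := by
      have := List.mem_range.mp hrm; omega
    rw [hg, hbucket r hr]
  rw [hnodes]
  simp

-- ===== VERDICT (by name: the statement is the Claim_ definition above) =====
theorem sort_nodes_spec : Claim_equal_sort_nodes := by
  intro m _
  unfold Spec_sort_nodes
  exact sort_nodes_eq m
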